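-- pv_equiv track=rewrite | github.com/AnnaWronowska/School | DataSets'Properties/find_mode.py | modificated
-- ===== SOURCE A (Python) =====
-- def modificated(array):
--     max_amount = 1
--     max_value = array[0] + 1
--     for i in range(len(array) - (max_value - 1)):
--         tmp_amount = 1
--         for j in range(i + 1, len(array)):
--             if array[j] == array[i]:
--                 tmp_amount += 1
--         if tmp_amount > max_amount:
--             max_amount = tmp_amount
--             max_value = array[i]
--     return max_value, max_amount
-- ===== SOURCE B (Python) =====
-- def modificated(array):
--     # one pass with a frequency table: counts[v] holds count of v at indices >= i;
--     # only valid indices inside the limited range can matter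
--     counts = {}
--     for x in array:
--         counts[x] = counts.get(x, 0) + 1
--     best_value = array[0] + 1
--     best_amount = 1
--     for i in range(min(len(array), len(array) - array[0])):
--         v = array[i]
--         c = counts[v]
--         if c > best_amount:
--             best_amount = c
--             best_value = v
--         counts[v] = c - 1
--     return best_value, best_amount
-- ===== Notes on version B (the rewrite author's own statement) =====
-- stated objective: faster
-- what changed: A rescans the whole suffix for every index (nested loops); B builds one frequency table of the array and decrements it in a single scan, so each suffix count is one dict lookup.
import Mathlib
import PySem

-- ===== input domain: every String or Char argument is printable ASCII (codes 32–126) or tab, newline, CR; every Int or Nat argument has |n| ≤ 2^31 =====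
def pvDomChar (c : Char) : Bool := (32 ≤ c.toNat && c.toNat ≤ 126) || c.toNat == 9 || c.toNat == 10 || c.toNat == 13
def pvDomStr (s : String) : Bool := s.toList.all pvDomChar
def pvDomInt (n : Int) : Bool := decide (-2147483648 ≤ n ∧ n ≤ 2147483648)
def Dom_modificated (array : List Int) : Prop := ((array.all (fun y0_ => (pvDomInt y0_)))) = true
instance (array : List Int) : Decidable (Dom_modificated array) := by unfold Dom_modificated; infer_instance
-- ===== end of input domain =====

-- B replaces A's quadratic suffix-rescan with one frequency table decremented in a single pass (faster, asymptotic).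

-- ===== PORT A =====
def modificated (array : List Int) : Int × Int :=
  let maxValue0 : Int := PySem.List.pyGetD array 0 0 + 1
  (PySem.List.pyRange 0 ((array.length : Int) - (maxValue0 - 1))).foldl
    (fun s i =>
      let ai := PySem.List.pyGetD array i 0
      let tmp := (PySem.List.pyRange (i + 1) (array.length : Int)).foldl
        (fun t j => if PySem.List.pyGetD array j 0 == ai then t + 1 else t) (1 : Int)
      if tmp > s.2 then (ai, tmp) else s)
    (maxValue0, 1)

-- ===== PORT B =====
def modificated_alt (array : List Int) : Int × Int :=
  let counts : PySem.Dict Int Int :=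
    array.foldl (fun d x => d.insert x (d.getD x 0 + 1)) PySem.Dict.empty
  let a0 : Int := PySem.List.pyGetD array 0 0
  let s := (PySem.List.pyRange 0 (min (array.length : Int) ((array.length : Int) - a0))).foldl
    (fun (s : (Int × Int) × PySem.Dict Int Int) i =>
      let v := PySem.List.pyGetD array i 0
      let c := s.2.getD v 0
      let p := if c > s.1.2 then (v, c) else s.1
      (p, s.2.insert v (c - 1)))
    ((a0 + 1, 1), counts)
  s.1

-- ===== PRECONDITION & SPEC =====
-- Pre_ excludes only the empty list, on which A raises IndexError reading the first element (B raises there too).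
def Pre_modificated (array : List Int) : Prop := array ≠ []
instance (array : List Int) : Decidable (Pre_modificated array) := by unfold Pre_modificated; infer_instance
def pvWitness_modificated : List Int := [2, 1, 2, 1, 1]

def Spec_modificated (array : List Int) (out : Int × Int) : Prop := out = modificated_alt array
instance (array : List Int) (out : Int × Int) : Decidable (Spec_modificated array out) := by unfold Spec_modificated; infer_instance

-- ===== CLAIM (what is proved, stated in full; the proofs are below) =====
def Claim_equal_modificated : Prop := ∀ (array : List Int), Dom_modificated array → Pre_modificated array → Spec_modificated array (modificated array)

-- ===== LEMMAS AND PROOFS =====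

-- B's frequency table: looking up v after the building fold gives d's value plus the count of v.
lemma counts_getD (xs : List Int) : ∀ (d : PySem.Dict Int Int) (v : Int),
    (xs.foldl (fun d x => d.insert x (d.getD x 0 + 1)) d).getD v 0
      = d.getD v 0 + (xs.count v : Int) := by
  induction xs with
  | nil => intro d v; simp
  | cons x t ih =>
    intro d v
    simp only [List.foldl_cons, ih, List.count_cons, PySem.Dict.getD_insert]
    by_cases h : v = x
    · subst h; simp; omega
    · simp [h, Ne.symm h]

-- A's inner scan from index j counts occurrences in the suffix array.drop j.
lemma suffix_countP (array : List Int) (v : Int) : ∀ k j : Nat, j + k = array.length →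
    (((PySem.List.pyRange (j : Int) (array.length : Int)).countP
        (fun jj => PySem.List.pyGetD array jj 0 == v)) : Int)
      = ((array.drop j).count v : Int) := by
  intro k
  induction k with
  | zero =>
    intro j hj
    have h1 : PySem.List.pyRange (j : Int) (array.length : Int) = [] := by
      simp [PySem.List.pyRange]; omega
    have h2 : array.drop j = [] := List.drop_eq_nil_of_le (by omega)
    simp [h1, h2]
  | succ k ih =>
    intro j hj
    have hjn : (j : Int) < (array.length : Int) := by omega
    have hjn' : j < array.length := by omega
    have hget : PySem.List.pyGetD array (j : Int) 0 = array[j] := by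
      rw [PySem.List.pyGetD_eq_getElem array 0 (by omega) hjn]; simp
    have hcast : ((j : Int) + 1) = ((j + 1 : Nat) : Int) := by push_cast; ring
    rw [PySem.List.pyRange_one_cons hjn, hcast, List.drop_eq_getElem_cons hjn',
        List.countP_cons, List.count_cons]
    push_cast
    have hih := ih (j + 1) (by omega)
    push_cast at hih
    rw [hih, hget]

-- The two main loops agree on the first k indices: A's pair equals B's pair, and B's
-- table holds the counts of the suffix array.drop k.
lemma main_loop (array : List Int) : ∀ (k : Nat), k ≤ array.length → ∀ (p : Int × Int),
    ((PySem.List.pyRange 0 (k : Int)).foldl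
      (fun s i =>
        let ai := PySem.List.pyGetD array i 0
        let tmp := (PySem.List.pyRange (i + 1) (array.length : Int)).foldl
          (fun t j => if PySem.List.pyGetD array j 0 == ai then t + 1 else t) (1 : Int)
        if tmp > s.2 then (ai, tmp) else s) p
      = ((PySem.List.pyRange 0 (k : Int)).foldl
          (fun (s : (Int × Int) × PySem.Dict Int Int) i =>
            let v := PySem.List.pyGetD array i 0
            let c := s.2.getD v 0
            let p := if c > s.1.2 then (v, c) else s.1
            (p, s.2.insert v (c - 1)))
          (p, array.foldl (fun d x => d.insert x (d.getD x 0 + 1)) PySem.Dict.empty)).1)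
    ∧ ∀ v, ((PySem.List.pyRange 0 (k : Int)).foldl
          (fun (s : (Int × Int) × PySem.Dict Int Int) i =>
            let v := PySem.List.pyGetD array i 0
            let c := s.2.getD v 0
            let p := if c > s.1.2 then (v, c) else s.1
            (p, s.2.insert v (c - 1)))
          (p, array.foldl (fun d x => d.insert x (d.getD x 0 + 1)) PySem.Dict.empty)).2.getD v 0
        = ((array.drop k).count v : Int) := by
  intro k
  induction k with
  | zero =>
    intro hk p
    refine ⟨rfl, fun v => ?_⟩
    simp [counts_getD array PySem.Dict.empty v]
  | succ k ih =>
    intro hk p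
    have hk' : k ≤ array.length := by omega
    have hkn : k < array.length := by omega
    obtain ⟨ihA, ihD⟩ := ih hk' p
    have hcast : ((k + 1 : Nat) : Int) = (k : Int) + 1 := by push_cast; ring
    rw [hcast, PySem.List.pyRange_one_succ_right (by exact_mod_cast Nat.zero_le k),
        List.foldl_append, List.foldl_append]
    simp only [List.foldl_cons, List.foldl_nil]
    set sB := (PySem.List.pyRange 0 (k : Int)).foldl
          (fun (s : (Int × Int) × PySem.Dict Int Int) i =>
            let v := PySem.List.pyGetD array i 0
            let c := s.2.getD v 0
            let p := if c > s.1.2 then (v, c) else s.1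
            (p, s.2.insert v (c - 1)))
          (p, array.foldl (fun d x => d.insert x (d.getD x 0 + 1)) PySem.Dict.empty) with hsB
    have hget : PySem.List.pyGetD array (k : Int) 0 = array[k] := by
      rw [PySem.List.pyGetD_eq_getElem array 0 (by omega) (by exact_mod_cast hkn)]; simp
    have hdrop : array.drop k = array[k] :: array.drop (k + 1) := List.drop_eq_getElem_cons hkn
    have htmp : (PySem.List.pyRange ((k : Int) + 1) (array.length : Int)).foldl
          (fun t j => if PySem.List.pyGetD array j 0 == PySem.List.pyGetD array (k : Int) 0 then t + 1 else t) (1 : Int)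
        = ((array.drop k).count array[k] : Int) := by
      rw [PySem.List.foldl_if_add_one]
      have hc1 : ((k : Int) + 1) = ((k + 1 : Nat) : Int) := by push_cast; ring
      rw [hc1, suffix_countP array (PySem.List.pyGetD array (k : Int) 0)
            (array.length - (k + 1)) (k + 1) (by omega)]
      rw [hget, hdrop, List.count_cons]
      simp only [BEq.rfl, if_true]
      push_cast
      omega
    have hc : sB.2.getD (PySem.List.pyGetD array (k : Int) 0) 0 = ((array.drop k).count array[k] : Int) := by
      rw [hget, ihD]
    refine ⟨?_, ?_⟩
    · simp only [htmp, hc, ihA]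
    · intro v
      simp only [hget, PySem.Dict.getD_insert]
      by_cases h : v = array[k]
      · subst h
        rw [if_pos rfl, ihD, hdrop, List.count_cons]
        simp only [BEq.rfl, if_true]
        push_cast
        omega
      · rw [if_neg h, ihD v, hdrop, List.count_cons]
        simp [Ne.symm h]

-- A's outer loop keeps max_amount ≥ 1.
lemma a_snd_ge_one (array : List Int) : ∀ (l : List Int) (p : Int × Int), 1 ≤ p.2 →
    1 ≤ (l.foldl
      (fun s i =>
        let ai := PySem.List.pyGetD array i 0
        let tmp := (PySem.List.pyRange (i + 1) (array.length : Int)).foldl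
          (fun t j => if PySem.List.pyGetD array j 0 == ai then t + 1 else t) (1 : Int)
        if tmp > s.2 then (ai, tmp) else s) p).2 := by
  intro l
  induction l with
  | nil => intro p hp; exact hp
  | cons i rest ih =>
    intro p hp
    simp only [List.foldl_cons]
    apply ih
    dsimp only
    split_ifs with h
    · omega
    · exact hp

-- Iterations of A's outer loop at indices ≥ len(array) have an empty inner range, so they change nothing.
lemma a_tail_noop (array : List Int) : ∀ (l : List Int), (∀ i ∈ l, (array.length : Int) ≤ i) →
    ∀ (p : Int × Int), 1 ≤ p.2 →
    l.foldl
      (fun s i =>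
        let ai := PySem.List.pyGetD array i 0
        let tmp := (PySem.List.pyRange (i + 1) (array.length : Int)).foldl
          (fun t j => if PySem.List.pyGetD array j 0 == ai then t + 1 else t) (1 : Int)
        if tmp > s.2 then (ai, tmp) else s) p = p := by
  intro l
  induction l with
  | nil => intro _ p _; rfl
  | cons i rest ih =>
    intro hmem p hp
    have hi : (array.length : Int) ≤ i := hmem i (by simp)
    have hempty : PySem.List.pyRange (i + 1) (array.length : Int) = [] := by
      simp [PySem.List.pyRange]; omega
    simp only [List.foldl_cons, hempty, List.foldl_nil]
    have hno : ¬ ((1 : Int) > p.2) := by omega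
    rw [if_neg hno]
    exact ih (fun j hj => hmem j (by simp [hj])) p hp

-- ===== VERDICT (by name: the statement is the Claim_ definition above) =====
theorem modificated_spec : Claim_equal_modificated := by
  intro array _ hne
  unfold Spec_modificated modificated modificated_alt
  obtain ⟨x, t, rfl⟩ : ∃ x t, array = x :: t := by
    cases array with
    | nil => exact absurd rfl hne
    | cons x t => exact ⟨x, t, rfl⟩
  have hx : PySem.List.pyGetD (x :: t) 0 0 = x := by
    simp [PySem.List.pyGetD, PySem.List.pyGet?, PySem.List.pyIdx?]
  simp only [hx, add_sub_cancel_right]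
  have hlen : (x :: t).length = t.length + 1 := rfl
  by_cases hx0 : 0 ≤ x
  · rw [min_eq_right (by omega : (((x :: t).length : Int) - x) ≤ ((x :: t).length : Int))]
    by_cases h : 0 ≤ ((x :: t).length : Int) - x
    · have hm : ((x :: t).length : Int) - x = ((((x :: t).length : Int) - x).toNat : Int) := by omega
      rw [hm]
      exact (main_loop (x :: t) (((x :: t).length : Int) - x).toNat (by
        rw [Int.toNat_le]
        omega) (x + 1, 1)).1
    · have h1 : PySem.List.pyRange 0 (((x :: t).length : Int) - x) = [] := by
        simp [PySem.List.pyRange]; omega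
      rw [h1]
      rfl
  · rw [min_eq_left (by omega : ((x :: t).length : Int) ≤ ((x :: t).length : Int) - x)]
    rw [PySem.List.pyRange_one_append 0 ((x :: t).length : Int) (((x :: t).length : Int) - x)
          (by omega) (by omega),
        List.foldl_append]
    rw [a_tail_noop (x :: t) _ (fun i hi => ((PySem.List.mem_pyRange_one).1 hi).1) _
          (a_snd_ge_one (x :: t) _ (x + 1, 1) (by norm_num))]
    exact (main_loop (x :: t) (x :: t).length (le_refl _) (x + 1, 1)).1
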